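-- pv_equiv track=rewrite | github.com/Michal0ss/WDI | WDI_algo/Zestaw_2/z86.py | najdluzszy_podciag_4zgodnych
-- ===== SOURCE A (Python) =====
-- def najdluzszy_podciag_4zgodnych(T):
--     def zbior_cyfr_w_systemie_czworkowym(liczba):
--         """Funkcja zwraca krotkę, która reprezentuje obecność cyfr 0-3 w liczbie w systemie o podstawie 4."""
--         cyfry = [0] * 4  # Tablica obecności cyfr 0, 1, 2, 3
--         while liczba > 0:
--             cyfry[liczba % 4] = 1  # Oznaczamy obecność cyfry
--             liczba //= 4
--         return tuple(cyfry)  # Konwertujemy na krotkę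
--
--     # Lista przechowująca grupy cyfr i ich liczność
--     grupy = []  # Każdy element to [zbiór_cyfr, licznik]
--
--     for liczba in T:
--         zbior_cyfr = zbior_cyfr_w_systemie_czworkowym(liczba)
--         # Sprawdzamy, czy taki zbiór cyfr już istnieje w grupach
--         znaleziono = False
--         for grupa in grupy:
--             if grupa[0] == zbior_cyfr:  # Zbiór cyfr już istnieje
--                 grupa[1] += 1
--                 znaleziono = True
--                 break
--         if not znaleziono:
--             grupy.append([zbior_cyfr, 1])  # Dodaj nową grupę
--
--     # Znajdujemy maksymalną liczność
--     maks_dlugosc = max(grupa[1] for grupa in grupy)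
--     return maks_dlugosc
-- ===== SOURCE B (Python) =====
-- def najdluzszy_podciag_4zgodnych(T):
--     def maska_cyfr(liczba):
--         """Presence set of base-4 digits of liczba, encoded as one integer 0..15."""
--         cyfry = [0] * 4
--         while liczba > 0:
--             cyfry[liczba % 4] = 1
--             liczba //= 4
--         return 8 * cyfry[0] + 4 * cyfry[1] + 2 * cyfry[2] + cyfry[3]
--
--     # sort all keys, then the answer is the longest run of consecutive equal keys
--     klucze = sorted(maska_cyfr(x) for x in T)
--     best = 0
--     run = 0
--     prev = None
--     for k in klucze:
--         if prev == k:
--             run += 1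
--         else:
--             prev = k
--             run = 1
--         if run > best:
--             best = run
--     return best
-- ===== Notes on version B (the rewrite author's own statement) =====
-- stated objective: alternative
-- what changed: B replaces A's incremental grouping (per-element linear search through a growing list of [key, count] groups) by a staged sort-then-scan: it builds the list of base-4 digit-presence keys in one pass, sorts it, and takes the length of the longest run of consecutive equal keys in a single scan; no group/counter structure is maintained at all.
-- crash fix: On the empty list A raises ValueError (max of an empty sequence) while B naturally returns 0 (an empty scan). — e.g. on najdluzszy_podciag_4zgodnych([]): A raises ValueError, B returns 0
import Mathlib
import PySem

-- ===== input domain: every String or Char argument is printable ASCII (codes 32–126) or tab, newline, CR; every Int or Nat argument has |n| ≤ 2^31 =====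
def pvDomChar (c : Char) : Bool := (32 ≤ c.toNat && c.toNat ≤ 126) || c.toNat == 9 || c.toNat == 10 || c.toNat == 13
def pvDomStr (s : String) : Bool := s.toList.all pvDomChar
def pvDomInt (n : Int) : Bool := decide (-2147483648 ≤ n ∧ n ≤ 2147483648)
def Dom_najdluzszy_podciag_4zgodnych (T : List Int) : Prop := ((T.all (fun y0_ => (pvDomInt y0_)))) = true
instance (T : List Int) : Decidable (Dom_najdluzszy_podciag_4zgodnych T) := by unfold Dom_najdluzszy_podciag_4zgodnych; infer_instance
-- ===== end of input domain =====

-- B replaces A's per-element linear search over accumulated [key,count] groups by a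
-- staged sort-then-scan: sort the list of base-4 digit-presence keys, then return the
-- length of the longest run of consecutive equal keys. Equivalence is proved on all
-- non-empty lists (Python A raises ValueError on []; B returns 0 there, see Raises_).


-- ===== PORT A =====

-- the 'while liczba > 0' loop of zbior_cyfr_w_systemie_czworkowym, over the 4-entry
-- presence table (ported as a 4-tuple; cyfry[liczba % 4] = 1 becomes a component update).
-- fuel only makes the recursion structural: liczba strictly decreases each iteration, so
-- liczba.toNat iterations always suffice and the guard '0 < liczba' alone decides the result
def pvCyfry : Nat → Int → Int × Int × Int × Int → Int × Int × Int × Int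
  | 0, _, c => c
  | fuel + 1, liczba, c =>
    if 0 < liczba then
      let r := PySem.Int.mod liczba 4
      let c' :=
        if r = 0 then (1, c.2.1, c.2.2.1, c.2.2.2)
        else if r = 1 then (c.1, 1, c.2.2.1, c.2.2.2)
        else if r = 2 then (c.1, c.2.1, 1, c.2.2.2)
        else (c.1, c.2.1, c.2.2.1, 1)
      pvCyfry fuel (PySem.Int.floordiv liczba 4) c'
    else c

def pvZbiorCyfr (liczba : Int) : Int × Int × Int × Int := pvCyfry liczba.toNat liczba (0, 0, 0, 0)

-- the inner 'for grupa in grupy: if grupa[0] == zbior_cyfr: grupa[1] += 1; break'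
-- (none = not found, i.e. znaleziono stays False)
def pvIncFirst (k : Int × Int × Int × Int) :
    List ((Int × Int × Int × Int) × Int) → Option (List ((Int × Int × Int × Int) × Int))
  | [] => none
  | g :: rest =>
    if g.1 = k then some ((g.1, g.2 + 1) :: rest)
    else (pvIncFirst k rest).map (g :: ·)

def pvStepA (grupy : List ((Int × Int × Int × Int) × Int)) (k : Int × Int × Int × Int) :
    List ((Int × Int × Int × Int) × Int) :=
  match pvIncFirst k grupy with
  | some g => g
  | none => grupy ++ [(k, 1)]

def najdluzszy_podciag_4zgodnych (T : List Int) : Int :=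
  let grupy := T.foldl (fun g liczba => pvStepA g (pvZbiorCyfr liczba)) []
  match PySem.List.max? (grupy.map (fun g => g.2)) (fun x => x) with
  | some m => m
  | none => 0   -- unreachable under Pre_: Python's max raises ValueError on empty T

-- ===== PORT B =====

-- Source B's maska_cyfr: the same presence loop, result encoded as 8*c0 + 4*c1 + 2*c2 + c3
def pvMaska (liczba : Int) : Int :=
  let c := pvCyfry liczba.toNat liczba (0, 0, 0, 0)
  8 * c.1 + 4 * c.2.1 + 2 * c.2.2.1 + c.2.2.2

-- one iteration of Source B's 'for k in klucze' loop over the state (best, run, prev)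
def pvScanStep (st : Int × Int × Option Int) (k : Int) : Int × Int × Option Int :=
  let best := st.1
  let run := st.2.1
  let prev := st.2.2
  let rp := if prev = some k then (run + 1, prev) else ((1 : Int), some k)
  (if best < rp.1 then rp.1 else best, rp.1, rp.2)

def najdluzszy_podciag_4zgodnych_alt (T : List Int) : Int :=
  let klucze := PySem.List.sorted (T.map pvMaska) (fun x => x) false
  (klucze.foldl pvScanStep (0, 0, none)).1

-- ===== PRECONDITION & SPEC =====
-- Pre_ excludes exactly the empty list, on which Python A raises ValueError (max of empty sequence).
def Pre_najdluzszy_podciag_4zgodnych (T : List Int) : Prop := T ≠ []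
instance (T : List Int) : Decidable (Pre_najdluzszy_podciag_4zgodnych T) := by
  unfold Pre_najdluzszy_podciag_4zgodnych; infer_instance

def pvWitness_najdluzszy_podciag_4zgodnych : List Int := [5, 5, 2]

-- On the empty list A raises ValueError (max of an empty sequence); B returns 0.
def Raises_najdluzszy_podciag_4zgodnych (T : List Int) : Prop := T = []
instance (T : List Int) : Decidable (Raises_najdluzszy_podciag_4zgodnych T) := by
  unfold Raises_najdluzszy_podciag_4zgodnych; infer_instance

def pvRaiseWitness_najdluzszy_podciag_4zgodnych : List Int := []
def pvRaiseWitnessOut_najdluzszy_podciag_4zgodnych : Int := 0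

def Spec_najdluzszy_podciag_4zgodnych (T : List Int) (out : Int) : Prop :=
  out = najdluzszy_podciag_4zgodnych_alt T
instance (T : List Int) (out : Int) : Decidable (Spec_najdluzszy_podciag_4zgodnych T out) := by
  unfold Spec_najdluzszy_podciag_4zgodnych; infer_instance

-- ===== CLAIM (what is proved, stated in full; the proofs are below) =====
def Claim_equal_najdluzszy_podciag_4zgodnych : Prop :=
  ∀ (T : List Int), Dom_najdluzszy_podciag_4zgodnych T →
    Pre_najdluzszy_podciag_4zgodnych T →
    Spec_najdluzszy_podciag_4zgodnych T (najdluzszy_podciag_4zgodnych T)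

def Claim_raises_najdluzszy_podciag_4zgodnych : Prop :=
  (∀ (T : List Int), Dom_najdluzszy_podciag_4zgodnych T →
      Raises_najdluzszy_podciag_4zgodnych T → ¬ Pre_najdluzszy_podciag_4zgodnych T) ∧
  (Dom_najdluzszy_podciag_4zgodnych pvRaiseWitness_najdluzszy_podciag_4zgodnych ∧
   Raises_najdluzszy_podciag_4zgodnych pvRaiseWitness_najdluzszy_podciag_4zgodnych ∧
   najdluzszy_podciag_4zgodnych_alt pvRaiseWitness_najdluzszy_podciag_4zgodnych =
     pvRaiseWitnessOut_najdluzszy_podciag_4zgodnych)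

-- ===== LEMMAS AND PROOFS =====

-- each component of the presence tuple stays 0 or 1
def pvBits (c : Int × Int × Int × Int) : Prop :=
  (c.1 = 0 ∨ c.1 = 1) ∧ (c.2.1 = 0 ∨ c.2.1 = 1) ∧
  (c.2.2.1 = 0 ∨ c.2.2.1 = 1) ∧ (c.2.2.2 = 0 ∨ c.2.2.2 = 1)

theorem pvCyfry_bits (fuel : Nat) : ∀ (liczba : Int) (c : Int × Int × Int × Int),
    pvBits c → pvBits (pvCyfry fuel liczba c) := by
  induction fuel with
  | zero => intro l c hc; exact hc
  | succ n ih =>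
      intro l c hc
      by_cases h : 0 < l
      · simp only [pvCyfry, if_pos h]
        apply ih
        obtain ⟨h1, h2, h3, h4⟩ := hc
        simp only [pvBits]
        split_ifs <;> simp_all
      · simp only [pvCyfry, if_neg h]; exact hc

theorem pvBits_zbior (liczba : Int) : pvBits (pvZbiorCyfr liczba) :=
  pvCyfry_bits _ _ _ (by simp [pvBits])

theorem pvMaska_eq (x : Int) :
    pvMaska x = 8 * (pvZbiorCyfr x).1 + 4 * (pvZbiorCyfr x).2.1 +
      2 * (pvZbiorCyfr x).2.2.1 + (pvZbiorCyfr x).2.2.2 := rfl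

-- the bridge: the tuple key and the integer key identify the same numbers
theorem pvKey_bridge (x y : Int) :
    pvZbiorCyfr x = pvZbiorCyfr y ↔ pvMaska x = pvMaska y := by
  constructor
  · intro h; rw [pvMaska_eq, pvMaska_eq, h]
  · intro h
    obtain ⟨a1, a2, a3, a4⟩ := pvBits_zbior x
    obtain ⟨b1, b2, b3, b4⟩ := pvBits_zbior y
    rw [pvMaska_eq, pvMaska_eq] at h
    have e1 : (pvZbiorCyfr x).1 = (pvZbiorCyfr y).1 := by omega
    have e2 : (pvZbiorCyfr x).2.1 = (pvZbiorCyfr y).2.1 := by omega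
    have e3 : (pvZbiorCyfr x).2.2.1 = (pvZbiorCyfr y).2.2.1 := by omega
    have e4 : (pvZbiorCyfr x).2.2.2 = (pvZbiorCyfr y).2.2.2 := by omega
    exact Prod.ext e1 (Prod.ext e2 (Prod.ext e3 e4))

-- ---- A-side characterization: grupy = first-occurrence dedup with counts ----

theorem pvIncFirst_none (k : Int × Int × Int × Int) (ks : List (Int × Int × Int × Int))
    (g : (Int × Int × Int × Int) → Int) (h : k ∉ ks) :
    pvIncFirst k (ks.map (fun j => (j, g j))) = none := by
  induction ks with
  | nil => rfl
  | cons a t ih =>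
      simp only [List.mem_cons, not_or] at h
      simp [pvIncFirst, Ne.symm h.1, ih h.2]

theorem pvIncFirst_mem (k : Int × Int × Int × Int) (ks : List (Int × Int × Int × Int))
    (g : (Int × Int × Int × Int) → Int) (hk : k ∈ ks) (hn : ks.Nodup) :
    pvIncFirst k (ks.map (fun j => (j, g j))) =
      some (ks.map (fun j => (j, if j = k then g j + 1 else g j))) := by
  induction ks with
  | nil => simp at hk
  | cons a t ih =>
      rcases List.nodup_cons.mp hn with ⟨ha, hnt⟩
      by_cases hak : a = k
      · subst hak
        have hcg : ∀ j ∈ t, (fun j => (j, if j = a then g j + 1 else g j)) j = (fun j => (j, g j)) j := by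
          intro j hj
          have : j ≠ a := fun e => ha (e ▸ hj)
          simp [this]
        simp [pvIncFirst, List.map_congr_left hcg]
      · have hkt : k ∈ t := by
          rcases List.mem_cons.mp hk with h | h
          · exact absurd h.symm hak
          · exact h
        simp only [List.map_cons, pvIncFirst, if_neg hak, ih hkt hnt, Option.map_some]

-- first-occurrence dedup of a right-extended list (tuple keys)
theorem pvDedup_append (P : List (Int × Int × Int × Int)) (k : Int × Int × Int × Int) :
    PySem.List.dedup (P ++ [k]) =
      if k ∈ P then PySem.List.dedup P else PySem.List.dedup P ++ [k] := by
  simp only [PySem.List.dedup_eq_ofList, PySem.Set.ofList_eq_foldl, List.foldl_append,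
    List.foldl_cons, List.foldl_nil]
  rw [← PySem.Set.ofList_eq_foldl]
  by_cases hkP : k ∈ P
  · simp [PySem.Set.add, PySem.Set.contains, PySem.Set.mem_ofList, hkP]
  · simp [PySem.Set.add, PySem.Set.contains, PySem.Set.mem_ofList, hkP]

theorem pvFoldA_char (P : List (Int × Int × Int × Int)) :
    P.foldl pvStepA [] = (PySem.List.dedup P).map (fun k => (k, (P.count k : Int))) := by
  induction P using List.reverseRecOn with
  | nil => simp [PySem.List.dedup]
  | append_singleton P k ih =>
      rw [List.foldl_append, List.foldl_cons, List.foldl_nil, ih]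
      by_cases hkP : k ∈ P
      · have hkd : k ∈ PySem.List.dedup P := by simp [hkP]
        rw [pvStepA, pvIncFirst_mem k _ _ hkd (PySem.List.nodup_dedup P), pvDedup_append,
          if_pos hkP]
        apply List.map_congr_left
        intro j hj
        by_cases hjk : j = k
        · subst hjk
          have h1 : List.count j (P ++ [j]) = List.count j P + 1 := by simp
          simp [h1]
        · have h0 : List.count j [k] = 0 := List.count_eq_zero.mpr (by simp [hjk])
          simp [List.count_append, hjk, h0]
      · rw [pvStepA, pvIncFirst_none k _ _ (by simp [hkP]),
          pvDedup_append, if_neg hkP, List.map_append]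
        dsimp only
        congr 1
        · apply List.map_congr_left
          intro j hj
          have hjP : j ∈ P := (PySem.List.mem_dedup P j).mp hj
          have hjk : j ≠ k := fun e => hkP (e ▸ hjP)
          have h0 : List.count j [k] = 0 := List.count_eq_zero.mpr (by simp [hjk])
          simp [List.count_append, h0]
        · simp [List.count_append, List.count_eq_zero_of_not_mem hkP]

-- ---- counts transfer between the two key representations ----

theorem pvCount_transfer (T : List Int) (x : Int) :
    (T.map pvZbiorCyfr).count (pvZbiorCyfr x) = (T.map pvMaska).count (pvMaska x) := by
  induction T with
  | nil => rfl
  | cons a t ih =>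
      simp only [List.map_cons, List.count_cons, ih]
      by_cases h : pvZbiorCyfr a = pvZbiorCyfr x
      · have h' : pvMaska a = pvMaska x := (pvKey_bridge a x).mp h
        simp [h, h']
      · have h' : pvMaska a ≠ pvMaska x := fun e => h ((pvKey_bridge a x).mpr e)
        simp [h, h']

-- ---- the multiset of group sizes, as a list of Ints ----

def pvCountsT (L : List (Int × Int × Int × Int)) : List Int :=
  (PySem.List.dedup L).map (fun k => (L.count k : Int))

def pvCounts (L : List Int) : List Int :=
  (PySem.List.dedup L).map (fun k => (L.count k : Int))

-- same statement as pvDedup_append, for Int keys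
theorem pvDedup_appendZ (P : List Int) (k : Int) :
    PySem.List.dedup (P ++ [k]) =
      if k ∈ P then PySem.List.dedup P else PySem.List.dedup P ++ [k] := by
  simp only [PySem.List.dedup_eq_ofList, PySem.Set.ofList_eq_foldl, List.foldl_append,
    List.foldl_cons, List.foldl_nil]
  rw [← PySem.Set.ofList_eq_foldl]
  by_cases hkP : k ∈ P
  · simp [PySem.Set.add, PySem.Set.contains, PySem.Set.mem_ofList, hkP]
  · simp [PySem.Set.add, PySem.Set.contains, PySem.Set.mem_ofList, hkP]

-- ---- max over two lists with the same members ----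

theorem pvMax_congr (l l' : List Int) (h : ∀ v, v ∈ l ↔ v ∈ l') :
    PySem.List.max? l (fun x => x) = PySem.List.max? l' (fun x => x) := by
  cases hl : PySem.List.max? l (fun x => x) with
  | none =>
      have hnil : l = [] := (PySem.List.max?_eq_none_iff _ _).mp hl
      subst hnil
      have hnil' : l' = [] := List.eq_nil_iff_forall_not_mem.mpr
        (fun v hv => by simpa using (h v).mpr hv)
      rw [hnil']
      exact ((PySem.List.max?_eq_none_iff _ _).mpr rfl).symm
  | some m =>
      cases hl' : PySem.List.max? l' (fun x => x) with
      | none =>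
          have hnil' : l' = [] := (PySem.List.max?_eq_none_iff _ _).mp hl'
          have hm : m ∈ l := PySem.List.max?_mem hl
          rw [hnil'] at h
          exact absurd ((h m).mp hm) (by simp)
      | some m' =>
          have hm : m ∈ l := PySem.List.max?_mem hl
          have hm' : m' ∈ l' := PySem.List.max?_mem hl'
          have h1 : m' ≤ m := PySem.List.max?_isMax hl m' ((h m').mpr hm')
          have h2 : m ≤ m' := PySem.List.max?_isMax hl' m ((h m).mp hm)
          rw [le_antisymm h2 h1]

-- counts lists over the two key representations have the same members
theorem pvCountsT_iff (T : List Int) (v : Int) :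
    v ∈ pvCountsT (T.map pvZbiorCyfr) ↔ v ∈ pvCounts (T.map pvMaska) := by
  constructor
  · intro hv
    obtain ⟨k, hk, hkv⟩ := List.mem_map.mp hv
    obtain ⟨x, hxT, hxk⟩ := List.mem_map.mp ((PySem.List.mem_dedup _ _).mp hk)
    subst hxk
    refine List.mem_map.mpr ⟨pvMaska x,
      (PySem.List.mem_dedup _ _).mpr (List.mem_map.mpr ⟨x, hxT, rfl⟩), ?_⟩
    rw [← pvCount_transfer]; exact hkv
  · intro hv
    obtain ⟨k, hk, hkv⟩ := List.mem_map.mp hv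
    obtain ⟨x, hxT, hxk⟩ := List.mem_map.mp ((PySem.List.mem_dedup _ _).mp hk)
    subst hxk
    refine List.mem_map.mpr ⟨pvZbiorCyfr x,
      (PySem.List.mem_dedup _ _).mpr (List.mem_map.mpr ⟨x, hxT, rfl⟩), ?_⟩
    rw [pvCount_transfer]; exact hkv

-- counts lists of two permuted lists have the same members
theorem pvCounts_perm_iff (L L' : List Int) (hp : L.Perm L')
    (v : Int) : v ∈ pvCounts L ↔ v ∈ pvCounts L' := by
  constructor
  · intro hv
    obtain ⟨k, hk, hkv⟩ := List.mem_map.mp hv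
    refine List.mem_map.mpr ⟨k, (PySem.List.mem_dedup _ _).mpr
      (hp.mem_iff.mp ((PySem.List.mem_dedup _ _).mp hk)), ?_⟩
    rw [← hp.count_eq]; exact hkv
  · intro hv
    obtain ⟨k, hk, hkv⟩ := List.mem_map.mp hv
    refine List.mem_map.mpr ⟨k, (PySem.List.mem_dedup _ _).mpr
      (hp.mem_iff.mpr ((PySem.List.mem_dedup _ _).mp hk)), ?_⟩
    rw [hp.count_eq]; exact hkv

-- ---- B-side: the scan over a sorted list computes the maximal multiplicity ----

theorem pvScan_char (S : List Int) :
    S.Pairwise (fun a b => a ≤ b) → S ≠ [] →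
    ∃ x M, S.foldl pvScanStep (0, 0, none) = (M, (S.count x : Int), some x) ∧
      x ∈ S ∧ (∀ a ∈ S, a ≤ x) ∧ M ∈ pvCounts S ∧ ∀ v ∈ pvCounts S, v ≤ M := by
  induction S using List.reverseRecOn with
  | nil => intro _ h; exact absurd rfl h
  | append_singleton L y ih =>
      intro hsort _
      have hsortL : L.Pairwise (fun a b => a ≤ b) := hsort.sublist (by simp)
      have hLy : ∀ a ∈ L, a ≤ y := by
        intro a ha
        exact (List.pairwise_append.mp hsort).2.2 a ha y (by simp)
      by_cases hLnil : L = []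
      · -- base: a single element
        subst hLnil
        refine ⟨y, 1, ?_, by simp, by simp, ?_, ?_⟩
        · simp [pvScanStep]
        · simp [pvCounts, PySem.List.dedup]
        · simp [pvCounts, PySem.List.dedup]
      · obtain ⟨x, M, hfold, hxL, hmax, hMmem, hMdom⟩ := ih hsortL hLnil
        have hM1 : 1 ≤ M := by
          obtain ⟨k, hk, hkv⟩ := List.mem_map.mp hMmem
          have hkL : k ∈ L := (PySem.List.mem_dedup _ _).mp hk
          have := List.count_pos_iff.mpr hkL
          omega
        rw [List.foldl_append, List.foldl_cons, List.foldl_nil, hfold]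
        by_cases hyx : y = x
        · -- same key as the last run: run increments
          subst hyx
          have hcnt : ((L ++ [y]).count y : Int) = (L.count y : Int) + 1 := by
            simp [List.count_append]
          have hded : PySem.List.dedup (L ++ [y]) = PySem.List.dedup L :=
            (pvDedup_appendZ L y).trans (if_pos hxL)
          have hcounts : pvCounts (L ++ [y]) =
              (PySem.List.dedup L).map
                (fun k => if k = y then (L.count y : Int) + 1 else (L.count k : Int)) := by
            rw [pvCounts, hded]
            apply List.map_congr_left
            intro j hj
            by_cases hjy : j = y
            · subst hjy; simp [List.count_append]
            · have h0 : List.count j [y] = 0 := List.count_eq_zero.mpr (by simp [hjy])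
              simp [List.count_append, hjy, h0]
          refine ⟨y, if M < (L.count y : Int) + 1 then (L.count y : Int) + 1 else M, ?_,
            by simp, ?_, ?_, ?_⟩
          · have hstep : pvScanStep (M, (L.count y : Int), some y) y =
                (if M < (L.count y : Int) + 1 then (L.count y : Int) + 1 else M,
                  (L.count y : Int) + 1, some y) := by
              simp [pvScanStep]
            rw [hcnt, hstep]
          · intro a ha
            rcases List.mem_append.mp ha with h | h
            · exact hLy a h
            · simp at h; omega
          · rw [hcounts]
            by_cases hlt : M < (L.count y : Int) + 1
            · rw [if_pos hlt]
              exact List.mem_map.mpr ⟨y, (PySem.List.mem_dedup _ _).mpr hxL, by simp⟩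
            · rw [if_neg hlt]
              obtain ⟨k, hk, hkv⟩ := List.mem_map.mp hMmem
              have hky : k ≠ y := by
                intro e; subst e; omega
              exact List.mem_map.mpr ⟨k, hk, by simp [hky, hkv]⟩
          · intro v hv
            rw [hcounts] at hv
            obtain ⟨k, hk, hkv⟩ := List.mem_map.mp hv
            by_cases hky : k = y
            · subst hky; rw [if_pos rfl] at hkv
              split_ifs with h <;> omega
            · simp only [if_neg hky] at hkv
              have := hMdom v (List.mem_map.mpr ⟨k, hk, hkv⟩)
              split_ifs with h <;> omega
        · -- a new, strictly larger key: run restarts at 1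
          have hyL : y ∉ L := by
            intro hy
            exact hyx (le_antisymm (hLy x hxL) (hmax y hy)).symm
          have hded : PySem.List.dedup (L ++ [y]) = PySem.List.dedup L ++ [y] :=
            (pvDedup_appendZ L y).trans (if_neg hyL)
          have hcnt1 : ((L ++ [y]).count y : Int) = 1 := by
            simp [List.count_append, List.count_eq_zero_of_not_mem hyL]
          have hcounts : pvCounts (L ++ [y]) = pvCounts L ++ [1] := by
            rw [pvCounts, hded, List.map_append]
            congr 1
            · apply List.map_congr_left
              intro j hj
              have hjL : j ∈ L := (PySem.List.mem_dedup _ _).mp hj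
              have hjy : j ≠ y := fun e => hyL (e ▸ hjL)
              have h0 : List.count j [y] = 0 := List.count_eq_zero.mpr (by simp [hjy])
              simp [List.count_append, h0]
            · simp [List.count_append, List.count_eq_zero_of_not_mem hyL]
          have hxy : (some x : Option Int) ≠ some y := by
            intro h; exact hyx (Option.some.inj h).symm
          refine ⟨y, M, ?_, by simp, ?_, ?_, ?_⟩
          · have hstep : pvScanStep (M, (L.count x : Int), some x) y =
                (if M < 1 then 1 else M, 1, some y) := by
              simp [pvScanStep, hxy]
            rw [hcnt1, hstep, if_neg (by omega)]
          · intro a ha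
            rcases List.mem_append.mp ha with h | h
            · exact hLy a h
            · simp at h; omega
          · rw [hcounts]; exact List.mem_append.mpr (Or.inl hMmem)
          · intro v hv
            rw [hcounts] at hv
            rcases List.mem_append.mp hv with h | h
            · exact hMdom v h
            · simp at h; omega

theorem pvFinal (T : List Int) (hT : T ≠ []) :
    najdluzszy_podciag_4zgodnych T = najdluzszy_podciag_4zgodnych_alt T := by
  simp only [najdluzszy_podciag_4zgodnych, najdluzszy_podciag_4zgodnych_alt]
  have hfoldA : T.foldl (fun g liczba => pvStepA g (pvZbiorCyfr liczba)) [] =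
      (T.map pvZbiorCyfr).foldl pvStepA [] := List.foldl_map.symm
  rw [hfoldA, pvFoldA_char, List.map_map]
  rw [show ((fun g => g.2) ∘ fun k => (k, ((T.map pvZbiorCyfr).count k : Int))) =
      (fun k => ((T.map pvZbiorCyfr).count k : Int)) from rfl]
  -- the sorted key list and its properties
  have hperm : (PySem.List.sorted (T.map pvMaska) (fun x => x) false).Perm (T.map pvMaska) :=
    PySem.List.sorted_perm _ _ _
  have hsort : (PySem.List.sorted (T.map pvMaska) (fun x => x) false).Pairwise
      (fun a b => a ≤ b) := PySem.List.sorted_pairwise _ _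
  have hSne : PySem.List.sorted (T.map pvMaska) (fun x => x) false ≠ [] := by
    intro h
    have := (PySem.List.sorted_eq_nil_iff (xs := T.map pvMaska)
      (key := fun x => x) (rev := false)).mp h
    exact hT (by simpa using this)
  obtain ⟨x, M, hfold, hxS, _, hMmem, hMdom⟩ := pvScan_char _ hsort hSne
  -- A's max? ranges over a list with the same members as pvCounts of the sorted keys
  have hmemiff : ∀ v, v ∈ pvCountsT (T.map pvZbiorCyfr) ↔
      v ∈ pvCounts (PySem.List.sorted (T.map pvMaska) (fun x => x) false) := by
    intro v
    rw [pvCountsT_iff T v]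
    exact pvCounts_perm_iff _ _ hperm.symm v
  have hcongr := pvMax_congr _ _ hmemiff
  rw [show (PySem.List.dedup (T.map pvZbiorCyfr)).map
        (fun k => ((T.map pvZbiorCyfr).count k : Int)) =
      pvCountsT (T.map pvZbiorCyfr) from rfl, hcongr]
  -- and that max? equals the scan's best
  have hmax : PySem.List.max?
      (pvCounts (PySem.List.sorted (T.map pvMaska) (fun x => x) false)) (fun x => x)
      = some M := by
    cases hm : PySem.List.max?
        (pvCounts (PySem.List.sorted (T.map pvMaska) (fun x => x) false)) (fun x => x) with
    | none =>
        have := (PySem.List.max?_eq_none_iff _ _).mp hm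
        rw [this] at hMmem
        simp at hMmem
    | some m =>
        have hmm := PySem.List.max?_mem hm
        have h1 : M ≤ m := PySem.List.max?_isMax hm M hMmem
        have h2 : m ≤ M := hMdom m hmm
        rw [le_antisymm h2 h1]
  rw [hmax, hfold]

-- ===== VERDICT (by name: the statement is the Claim_ definition above) =====
theorem najdluzszy_podciag_4zgodnych_spec : Claim_equal_najdluzszy_podciag_4zgodnych := by
  intro T _ hpre
  unfold Spec_najdluzszy_podciag_4zgodnych
  exact pvFinal T hpre

@[simp] theorem najdluzszy_podciag_4zgodnych_raises : Claim_raises_najdluzszy_podciag_4zgodnych := by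
  unfold Claim_raises_najdluzszy_podciag_4zgodnych
  refine ⟨?_, by decide⟩
  intro T _ hr
  unfold Raises_najdluzszy_podciag_4zgodnych at hr
  unfold Pre_najdluzszy_podciag_4zgodnych
  simp [hr]
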